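-- pv_equiv track=rewrite | github.com/yfchenggithub/mathnote | scripts/build_conclusion_pdfs.py | split_csv_tokens
-- ===== SOURCE A (Python) =====
-- def split_csv_tokens(values: list[str] | None) -> list[str]:
--     if not values:
--         return []
--     tokens: list[str] = []
--     for raw in values:
--         for token in raw.split(","):
--             piece = token.strip()
--             if piece:
--                 tokens.append(piece)
--     return tokens
-- ===== SOURCE B (Python) =====
-- def split_csv_tokens(values):
--     tokens = []
--     for raw in values or ():
--         buf = []       # characters of the current token, already stripped on both sides
--         pending = []   # whitespace run seen after a non-space char; flushed only if more text follows
--         for ch in raw: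
--             if ch == ',':
--                 if buf:
--                     tokens.append(''.join(buf))
--                 buf = []
--                 pending = []
--             elif ch.isspace():
--                 if buf:
--                     pending.append(ch)
--             else:
--                 buf.extend(pending)
--                 pending = []
--                 buf.append(ch)
--         if buf:
--             tokens.append(''.join(buf))
--     return tokens
-- ===== Notes on version B (the rewrite author's own statement) =====
-- stated objective: alternative
-- what changed: B replaces A's split(",")+strip per string with a hand-written one-pass character state machine (current-buffer + pending-whitespace run, flushed on commas and at end of string) that never calls split or strip.
import Mathlib
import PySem

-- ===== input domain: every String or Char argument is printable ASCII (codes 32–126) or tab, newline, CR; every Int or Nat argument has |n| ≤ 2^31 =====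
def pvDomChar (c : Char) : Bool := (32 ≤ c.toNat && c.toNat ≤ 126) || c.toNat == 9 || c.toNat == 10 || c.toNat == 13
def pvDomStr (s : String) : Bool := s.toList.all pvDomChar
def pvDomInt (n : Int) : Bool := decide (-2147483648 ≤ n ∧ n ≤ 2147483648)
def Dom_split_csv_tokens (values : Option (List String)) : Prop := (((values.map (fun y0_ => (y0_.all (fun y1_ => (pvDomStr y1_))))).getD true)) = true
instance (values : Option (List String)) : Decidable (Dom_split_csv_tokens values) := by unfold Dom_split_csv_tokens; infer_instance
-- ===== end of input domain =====

-- B replaces A's per-string split(",")+strip with a one-pass character state machine; same result, same cost.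

-- ===== PORT A =====
-- raw.split(",") : the separator "," is a non-empty literal, so PySem.Str.split? is
-- always `some`; `.getD []` only discharges the Option and is never the taken value.
def split_csv_tokens (values : Option (List String)) : List String :=
  match values with
  | none => []
  | some vs =>
    if vs = [] then []
    else
      vs.foldl (fun tokens raw =>
        ((PySem.Str.split? raw ",").getD []).foldl (fun tokens token =>
          let piece := PySem.Str.strip token
          if piece ≠ "" then tokens ++ [piece] else tokens) tokens) []

-- ===== PORT B =====
-- One character step of Source B's inner loop; state = (tokens, buf, pending).
def pvBStep (st : List String × List Char × List Char) (ch : Char) :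
    List String × List Char × List Char :=
  if ch = ',' then
    ((if st.2.1 ≠ [] then st.1 ++ [String.ofList st.2.1] else st.1), [], [])
  else if PySem.Chars.isspace ch then
    (st.1, st.2.1, if st.2.1 ≠ [] then st.2.2 ++ [ch] else st.2.2)
  else
    (st.1, st.2.1 ++ st.2.2 ++ [ch], [])

-- `for raw in values or ()` + per-string char loop + final flush of buf.
def split_csv_tokens_alt (values : Option (List String)) : List String :=
  (values.getD []).foldl (fun tokens raw =>
    let st := raw.toList.foldl pvBStep (tokens, [], [])
    if st.2.1 ≠ [] then st.1 ++ [String.ofList st.2.1] else st.1) []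

-- ===== PRECONDITION & SPEC =====
def Spec_split_csv_tokens (values : Option (List String)) (out : List String) : Prop := out = split_csv_tokens_alt values
instance (values : Option (List String)) (out : List String) : Decidable (Spec_split_csv_tokens values out) := by unfold Spec_split_csv_tokens; infer_instance

-- ===== CLAIM (what is proved, stated in full; the proofs are below) =====
def Claim_equal_split_csv_tokens : Prop := ∀ (values : Option (List String)), Dom_split_csv_tokens values → Spec_split_csv_tokens values (split_csv_tokens values)

-- ===== LEMMAS AND PROOFS =====

-- Simple spec of splitting on the single character ',' (proof helper only).
def commaSplit : List Char → List (List Char)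
  | [] => [[]]
  | c :: rest => if c = ',' then [] :: commaSplit rest
                 else (commaSplit rest).modifyHead (fun p => c :: p)

theorem commaSplit_ne_nil (cs : List Char) : commaSplit cs ≠ [] := by
  cases cs with
  | nil => simp [commaSplit]
  | cons c rest =>
    simp only [commaSplit]
    split_ifs with h
    · simp
    · cases h' : commaSplit rest with
      | nil => exact absurd h' (commaSplit_ne_nil rest)
      | cons p ps => simp

theorem modifyHead_fun_id {A : Type} (l : List A) : l.modifyHead (fun p => p) = l :=
  congrFun List.modifyHead_id l

theorem splitOn_go_comma (fuel : Nat) (l cur : List Char) (acc : List (List Char))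
    (h : l.length < fuel) :
    PySem.Chars.splitOn.go [','] fuel l cur acc
      = acc.reverse ++ (commaSplit l).modifyHead (fun p => cur.reverse ++ p) := by
  induction fuel generalizing l cur acc with
  | zero => omega
  | succ fuel ih =>
    cases l with
    | nil => simp [PySem.Chars.splitOn.go, commaSplit]
    | cons c rest =>
      simp only [PySem.Chars.splitOn.go]
      by_cases hc : c = ','
      · subst hc
        rw [if_pos (by simp [List.isPrefixOf])]
        rw [ih _ _ _ (by simpa using Nat.lt_of_succ_lt_succ h)]
        simp [commaSplit, modifyHead_fun_id]
      · rw [if_neg (by simp only [List.isPrefixOf, Bool.and_eq_true, beq_iff_eq]; exact fun hx => hc hx.1.symm)]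
        rw [ih _ _ _ (by simpa using Nat.lt_of_succ_lt_succ h)]
        simp only [commaSplit, if_neg hc]
        cases h' : commaSplit rest with
        | nil => exact absurd h' (commaSplit_ne_nil rest)
        | cons p ps => simp

theorem splitOn_comma (cs : List Char) :
    PySem.Chars.splitOn cs [','] = commaSplit cs := by
  rw [PySem.Chars.splitOn, splitOn_go_comma _ _ _ _ (by omega)]
  simp [modifyHead_fun_id]

-- raw.split(",") at the String level, as a List String.
def strTokens (s : String) : List String := (PySem.Str.split? s ",").getD []

theorem map_toList_strTokens (s : String) :
    (strTokens s).map String.toList = commaSplit s.toList := by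
  have h := PySem.Str.split?_map s ","
  rw [PySem.Chars.split?] at h
  have hsep : ((",".toList : List Char)) = [','] := by decide
  rw [hsep] at h
  simp only [List.isEmpty_cons, Bool.false_eq_true, if_false] at h
  unfold strTokens
  cases h' : PySem.Str.split? s "," with
  | none => rw [h'] at h; simp at h
  | some ss =>
    rw [h'] at h
    rw [← splitOn_comma]
    simpa using h

-- strip facts ------------------------------------------------------------

theorem strip_fix_lstrip {b : List Char} (hb : PySem.Chars.strip b = b) :
    PySem.Chars.lstrip b = b := by
  have h1 : PySem.Chars.lstrip b <:+ b := List.dropWhile_suffix _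
  apply h1.eq_of_length
  have h2 : (PySem.Chars.strip b).length ≤ (PySem.Chars.lstrip b).length := by
    unfold PySem.Chars.strip PySem.Chars.rstrip
    calc ((PySem.Chars.lstrip b).reverse.dropWhile PySem.Chars.isspace).reverse.length
        = ((PySem.Chars.lstrip b).reverse.dropWhile PySem.Chars.isspace).length := by
          rw [List.length_reverse]
      _ ≤ (PySem.Chars.lstrip b).reverse.length := (List.dropWhile_suffix _).length_le
      _ = (PySem.Chars.lstrip b).length := List.length_reverse
  have h3 : (PySem.Chars.lstrip b).length ≤ b.length := h1.length_le
  rw [hb] at h2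
  omega

theorem lstrip_all_space {p : List Char} (hp : ∀ c ∈ p, PySem.Chars.isspace c = true) :
    PySem.Chars.lstrip p = [] := by
  unfold PySem.Chars.lstrip
  rw [List.dropWhile_eq_nil_iff]
  intro x hx; exact hp x hx

theorem strip_all_space {p : List Char} (hp : ∀ c ∈ p, PySem.Chars.isspace c = true) :
    PySem.Chars.strip p = [] := by
  unfold PySem.Chars.strip
  rw [lstrip_all_space hp]
  rfl

theorem strip_append_space {b p : List Char} (hb : PySem.Chars.strip b = b)
    (hp : ∀ c ∈ p, PySem.Chars.isspace c = true) :
    PySem.Chars.strip (b ++ p) = b := by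
  by_cases hbe : b = []
  · subst hbe; simpa using strip_all_space hp
  · have hl := strip_fix_lstrip hb
    unfold PySem.Chars.strip PySem.Chars.lstrip PySem.Chars.rstrip
    rw [List.dropWhile_append]
    have hbl : b.dropWhile PySem.Chars.isspace = b := hl
    rw [hbl]
    rw [if_neg (by simp [List.isEmpty_iff, hbe])]
    rw [List.reverse_append, List.dropWhile_append]
    have hpr : p.reverse.dropWhile PySem.Chars.isspace = [] := by
      rw [List.dropWhile_eq_nil_iff]; intro x hx; exact hp x (List.mem_reverse.mp hx)
    rw [hpr]
    simp only [List.isEmpty_nil, if_pos]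
    have : (b.reverse.dropWhile PySem.Chars.isspace).reverse = b := by
      have := hb
      unfold PySem.Chars.strip PySem.Chars.rstrip at this
      rw [hl] at this
      exact this
    exact this

theorem strip_cons_space {t : List Char} {c : Char} (hc : PySem.Chars.isspace c = true) :
    PySem.Chars.strip (c :: t) = PySem.Chars.strip t := by
  unfold PySem.Chars.strip PySem.Chars.lstrip
  rw [List.dropWhile_cons_of_pos hc]

theorem strip_snoc_nonspace {b p : List Char} {c : Char} (hb : PySem.Chars.strip b = b)
    (hbp : b = [] → p = []) (hc : PySem.Chars.isspace c = false) :
    PySem.Chars.strip (b ++ p ++ [c]) = b ++ p ++ [c] := by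
  unfold PySem.Chars.strip PySem.Chars.rstrip PySem.Chars.lstrip
  have hr : ((b ++ p ++ [c]).reverse).dropWhile PySem.Chars.isspace = (b ++ p ++ [c]).reverse := by
    simp only [List.reverse_append, List.reverse_cons, List.reverse_nil, List.nil_append,
      List.cons_append]
    rw [List.dropWhile_cons_of_neg (by simp [hc])]
  have hlft : (b ++ p ++ [c]).dropWhile PySem.Chars.isspace = b ++ p ++ [c] := by
    by_cases hbe : b = []
    · rw [hbe, hbp hbe]
      simp only [List.nil_append]
      rw [List.dropWhile_cons_of_neg (by simp [hc])]
    · have hbl : List.dropWhile PySem.Chars.isspace b = b := strip_fix_lstrip hb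
      rw [List.append_assoc, List.dropWhile_append, hbl]
      rw [if_neg (by simp [List.isEmpty_iff, hbe])]
  rw [hlft, hr]
  simp

-- One stripped token from a raw comma-separated chunk (proof helper only).
def stripTok (t : List Char) : Option (List Char) :=
  if PySem.Chars.strip t = [] then none else some (PySem.Chars.strip t)

-- Flushing the final buffer (proof helper; the port writes this inline).
def pvFlush (st : List String × List Char × List Char) : List String :=
  if st.2.1 ≠ [] then st.1 ++ [String.ofList st.2.1] else st.1

-- What Source B's inner char loop (plus the final flush) computes on one string.
set_option maxRecDepth 8192 in
theorem machine_run (cs : List Char) : ∀ (T : List String) (b p : List Char),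
    PySem.Chars.strip b = b → (∀ c ∈ p, PySem.Chars.isspace c = true) → (b = [] → p = []) →
    pvFlush (cs.foldl pvBStep (T, b, p))
      = T ++ (((commaSplit cs).modifyHead (fun t => b ++ p ++ t)).filterMap stripTok).map String.ofList := by
  induction cs with
  | nil =>
    intro T b p hb hp hbp
    simp only [List.foldl_nil, commaSplit, List.modifyHead, List.append_nil]
    have hstrip : PySem.Chars.strip (b ++ p) = b := strip_append_space hb hp
    by_cases hbe : b = []
    · have hpe := hbp hbe
      simp [pvFlush, hbe, hpe, stripTok, PySem.Chars.strip, PySem.Chars.lstrip,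
        PySem.Chars.rstrip]
    · simp [pvFlush, hbe, stripTok, hstrip]
  | cons c rest ih =>
    intro T b p hb hp hbp
    simp only [List.foldl_cons]
    by_cases hcomma : c = ','
    · subst hcomma
      rw [show pvBStep (T, b, p) ','
          = ((if b ≠ [] then T ++ [String.ofList b] else T), [], []) from by simp [pvBStep]]
      rw [ih _ [] [] rfl (by simp) (fun _ => rfl)]
      rw [show commaSplit (',' :: rest) = [] :: commaSplit rest from by simp [commaSplit]]
      cases h' : commaSplit rest with
      | nil => exact absurd h' (commaSplit_ne_nil rest)
      | cons t ts =>
        simp only [List.modifyHead, List.nil_append, List.append_nil, List.filterMap_cons]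
        have hbp' : stripTok (b ++ p) = if b = [] then none else some b := by
          simp only [stripTok, strip_append_space hb hp]
        by_cases hbe : b = []
        · subst hbe
          have hpe : p = [] := hbp rfl
          subst hpe
          rfl
        · rw [if_pos hbe, hbp', if_neg hbe]
          simp [List.append_assoc]
    · by_cases hsp : PySem.Chars.isspace c = true
      · by_cases hbe : b = []
        · have hpe := hbp hbe
          rw [show pvBStep (T, b, p) c = (T, b, p) from by
            simp [pvBStep, hcomma, hsp, hbe, hpe]]
          rw [ih _ b p hb hp hbp]
          simp only [commaSplit, if_neg hcomma]
          cases h' : commaSplit rest with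
          | nil => exact absurd h' (commaSplit_ne_nil rest)
          | cons t ts =>
            simp only [List.modifyHead, List.filterMap_cons, hbe, hpe, List.nil_append]
            rw [show stripTok (c :: t) = stripTok t from by
              simp only [stripTok, strip_cons_space hsp]]
        · rw [show pvBStep (T, b, p) c = (T, b, p ++ [c]) from by
            simp [pvBStep, hcomma, hsp, hbe]]
          rw [ih _ b (p ++ [c]) hb
            (by intro x hx; rcases List.mem_append.mp hx with h | h
                · exact hp x h
                · simp at h; subst h; exact hsp)
            (fun h => absurd h hbe)]
          simp only [commaSplit, if_neg hcomma]
          cases h' : commaSplit rest with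
          | nil => exact absurd h' (commaSplit_ne_nil rest)
          | cons t ts =>
            simp only [List.modifyHead]
            congr 3
            simp
      · rw [show pvBStep (T, b, p) c = (T, b ++ p ++ [c], []) from by
          simp [pvBStep, hcomma, hsp]]
        rw [ih _ (b ++ p ++ [c]) []
          (strip_snoc_nonspace hb hbp (by simpa using hsp)) (by simp) (by simp)]
        simp only [commaSplit, if_neg hcomma]
        cases h' : commaSplit rest with
        | nil => exact absurd h' (commaSplit_ne_nil rest)
        | cons t ts =>
          simp only [List.modifyHead]
          congr 3
          simp

-- A's stripped-and-filtered tokens of one raw string, compared with stripTok.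
theorem filterMap_stripTok (l : List String) :
    ((l.map String.toList).filterMap stripTok).map String.ofList
      = (l.filter (fun t => PySem.Str.strip t ≠ "")).map PySem.Str.strip := by
  induction l with
  | nil => rfl
  | cons t ts ih =>
    simp only [List.map_cons, List.filterMap_cons, List.filter_cons]
    have hts : (PySem.Str.strip t).toList = PySem.Chars.strip t.toList := PySem.Str.toList_strip t
    by_cases he : PySem.Chars.strip t.toList = []
    · have h0 : PySem.Str.strip t = "" := by
        apply String.toList_inj.mp; rw [hts, he]; rfl
      simpa [stripTok, he, h0] using ih
    · have hne : PySem.Str.strip t ≠ "" := by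
        intro h; apply he; rw [← hts, h]; rfl
      have hofl : String.ofList (PySem.Chars.strip t.toList) = PySem.Str.strip t := by
        apply String.toList_inj.mp; rw [String.toList_ofList, hts]
      simpa [stripTok, he, hne, hofl] using ih

-- ===== VERDICT (by name: the statement is the Claim_ definition above) =====
theorem split_csv_tokens_spec : Claim_equal_split_csv_tokens := by
  intro values _
  unfold Spec_split_csv_tokens split_csv_tokens split_csv_tokens_alt
  cases values with
  | none => rfl
  | some vs =>
    simp only [Option.getD_some]
    by_cases hvs : vs = []
    · simp [hvs]
    · simp only [if_neg hvs]
      have hA : vs.foldl (fun tokens raw =>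
          ((PySem.Str.split? raw ",").getD []).foldl (fun tokens token =>
            let piece := PySem.Str.strip token
            if piece ≠ "" then tokens ++ [piece] else tokens) tokens) []
          = vs.flatMap (fun raw =>
              ((strTokens raw).filter (fun t => PySem.Str.strip t ≠ "")).map PySem.Str.strip) := by
        have hfun : (fun (tokens : List String) raw =>
            ((PySem.Str.split? raw ",").getD []).foldl (fun tokens token =>
              let piece := PySem.Str.strip token
              if piece ≠ "" then tokens ++ [piece] else tokens) tokens)
          = (fun acc raw => acc ++
              ((strTokens raw).filter (fun t => PySem.Str.strip t ≠ "")).map PySem.Str.strip) := by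
          funext acc raw
          simpa using PySem.List.foldl_append_if
            (fun t => decide (PySem.Str.strip t ≠ "")) PySem.Str.strip (strTokens raw) acc
        rw [hfun, PySem.List.foldl_append_eq_flatMap, List.nil_append]
      rw [hA]
      have hstep : (fun (tokens : List String) raw =>
          let st := raw.toList.foldl pvBStep (tokens, [], []);
          if st.2.1 ≠ [] then st.1 ++ [String.ofList st.2.1] else st.1)
        = (fun tokens raw => tokens ++
            ((strTokens raw).filter (fun t => PySem.Str.strip t ≠ "")).map PySem.Str.strip) := by
        funext T raw
        show pvFlush (raw.toList.foldl pvBStep (T, [], [])) = _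
        rw [machine_run raw.toList T [] [] rfl (by simp) (fun _ => rfl)]
        congr 1
        have hmod : (commaSplit raw.toList).modifyHead (fun t => [] ++ [] ++ t)
            = commaSplit raw.toList := by
          simpa using modifyHead_fun_id (commaSplit raw.toList)
        rw [hmod, ← map_toList_strTokens, filterMap_stripTok]
      rw [hstep, PySem.List.foldl_append_eq_flatMap, List.nil_append]
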